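-- pv_equiv track=rewrite | github.com/evaportelance/vqa-function-word-learning | new-balanced-clevr-dataset-creation/get_childes_frequencies.py | get_token_counts
-- ===== SOURCE A (Python) =====
-- def get_token_counts(data):
--     word_set = {"and", "or", "more", "fewer", "behind", "front", "same", "less"}
--     token_count_dict = {"and": 0, "or": 0, "more": 0, "fewer": 0, "behind": 0, "in front": 0, "same": 0, "less":0}
--     prev_word = ""
--     for word in data:
--         if word in word_set:
--             if word == "front":
--                 if prev_word == "in":
--                     token_count_dict["in front"] += 1
--             else:
--                 token_count_dict[word] += 1
--         prev_word = word
--     return token_count_dict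
-- ===== SOURCE B (Python) =====
-- def get_token_counts(data):
--     tokens = list(data)
--     in_front = sum(1 for pair in zip(tokens, tokens[1:]) if pair == ("in", "front"))
--     return {
--         "and": tokens.count("and"),
--         "or": tokens.count("or"),
--         "more": tokens.count("more"),
--         "fewer": tokens.count("fewer"),
--         "behind": tokens.count("behind"),
--         "in front": in_front,
--         "same": tokens.count("same"),
--         "less": tokens.count("less"),
--     }
-- ===== Notes on version B (the rewrite author's own statement) =====
-- stated objective: simpler
-- what changed: Replaces the stateful single pass (prev_word tracking plus a mutated tally dict) by two independent stateless passes: per-word counts read directly with list.count, and the 'in front' slot computed as a count over adjacent pairs zip(tokens, tokens[1:]); the result dict is assembled in one literal.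
import Mathlib
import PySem

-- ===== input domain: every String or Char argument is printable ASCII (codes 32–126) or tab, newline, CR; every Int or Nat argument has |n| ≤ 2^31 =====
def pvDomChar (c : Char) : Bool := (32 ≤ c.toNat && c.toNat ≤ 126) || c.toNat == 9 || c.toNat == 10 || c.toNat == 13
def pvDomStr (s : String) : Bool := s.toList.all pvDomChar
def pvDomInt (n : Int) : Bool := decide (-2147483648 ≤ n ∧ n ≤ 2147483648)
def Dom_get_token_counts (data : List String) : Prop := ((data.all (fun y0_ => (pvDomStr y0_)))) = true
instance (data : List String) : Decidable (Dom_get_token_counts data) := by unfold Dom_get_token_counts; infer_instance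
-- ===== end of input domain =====

-- B replaces A's stateful single pass (prev_word + mutated tally dict) by stateless passes:
-- list.count per word and a zip-of-adjacent-pairs count for "in front"; objective: simpler.

-- ===== PORT A =====
def pvWordSet : PySem.Set String :=
  PySem.Set.ofList ["and", "or", "more", "fewer", "behind", "front", "same", "less"]

def pvStepA (st : PySem.Dict String Int × String) (word : String) :
    PySem.Dict String Int × String :=
  let d := st.1
  let prev := st.2
  let d :=
    if pvWordSet.contains word then
      if word = "front" then
        if prev = "in" then d.modify "in front" 0 (· + 1) else d
      else d.modify word 0 (· + 1)
    else d
  (d, word)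

def get_token_counts (data : List String) : List (String × Int) :=
  let init : PySem.Dict String Int :=
    PySem.Dict.ofList [("and", 0), ("or", 0), ("more", 0), ("fewer", 0), ("behind", 0),
      ("in front", 0), ("same", 0), ("less", 0)]
  (data.foldl pvStepA (init, "")).1.items

-- ===== PORT B =====
def get_token_counts_alt (data : List String) : List (String × Int) :=
  let tokens := data
  let inFront : Int :=
    ((tokens.zip (PySem.List.slice tokens (some 1) none)).filter
      (fun p => p == ("in", "front"))).length
  [("and", (tokens.count "and" : Int)), ("or", (tokens.count "or" : Int)),
   ("more", (tokens.count "more" : Int)), ("fewer", (tokens.count "fewer" : Int)),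
   ("behind", (tokens.count "behind" : Int)), ("in front", inFront),
   ("same", (tokens.count "same" : Int)), ("less", (tokens.count "less" : Int))]

-- ===== PRECONDITION & SPEC =====
def Spec_get_token_counts (data : List String) (out : List (String × Int)) : Prop := out = get_token_counts_alt data
instance (data : List String) (out : List (String × Int)) : Decidable (Spec_get_token_counts data out) := by unfold Spec_get_token_counts; infer_instance

-- ===== CLAIM (what is proved, stated in full; the proofs are below) =====
def Claim_equal_get_token_counts : Prop := ∀ (data : List String), Dom_get_token_counts data → Spec_get_token_counts data (get_token_counts data)

-- ===== LEMMAS AND PROOFS =====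

-- the "in front" tally of A's loop: adjacent pairs (prev, w) equal to ("in", "front")
def pvPC (prev : String) : List String → Int
  | [] => 0
  | w :: ws => (if prev = "in" ∧ w = "front" then 1 else 0) + pvPC w ws

lemma pvFoldA (ws : List String) : ∀ (prev : String) (a o m f b i s l : Int),
    (ws.foldl pvStepA
      (PySem.Dict.mk [("and", a), ("or", o), ("more", m), ("fewer", f), ("behind", b),
        ("in front", i), ("same", s), ("less", l)], prev)).1
    = PySem.Dict.mk [("and", a + ws.count "and"), ("or", o + ws.count "or"),
        ("more", m + ws.count "more"), ("fewer", f + ws.count "fewer"),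
        ("behind", b + ws.count "behind"), ("in front", i + pvPC prev ws),
        ("same", s + ws.count "same"), ("less", l + ws.count "less")] := by
  induction ws with
  | nil => intro prev a o m f b i s l; simp [pvPC]
  | cons w ws ih =>
    intro prev a o m f b i s l
    simp only [List.foldl_cons]
    by_cases h1 : w = "and"
    · subst h1
      rw [show pvStepA (PySem.Dict.mk [("and", a), ("or", o), ("more", m), ("fewer", f),
            ("behind", b), ("in front", i), ("same", s), ("less", l)], prev) "and"
          = (PySem.Dict.mk [("and", a + 1), ("or", o), ("more", m), ("fewer", f), ("behind", b),
            ("in front", i), ("same", s), ("less", l)], "and") from by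
        simp [pvStepA, pvWordSet, PySem.Dict.modify, PySem.Dict.insert, PySem.Dict.getD,
          PySem.Dict.get?, PySem.Set.contains, PySem.Set.ofList]]
      rw [ih]; simp [pvPC]; omega
    by_cases h2 : w = "or"
    · subst h2
      rw [show pvStepA (PySem.Dict.mk [("and", a), ("or", o), ("more", m), ("fewer", f),
            ("behind", b), ("in front", i), ("same", s), ("less", l)], prev) "or"
          = (PySem.Dict.mk [("and", a), ("or", o + 1), ("more", m), ("fewer", f), ("behind", b),
            ("in front", i), ("same", s), ("less", l)], "or") from by
        simp [pvStepA, pvWordSet, PySem.Dict.modify, PySem.Dict.insert, PySem.Dict.getD,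
          PySem.Dict.get?, PySem.Set.contains, PySem.Set.ofList]]
      rw [ih]; simp [pvPC]; omega
    by_cases h3 : w = "more"
    · subst h3
      rw [show pvStepA (PySem.Dict.mk [("and", a), ("or", o), ("more", m), ("fewer", f),
            ("behind", b), ("in front", i), ("same", s), ("less", l)], prev) "more"
          = (PySem.Dict.mk [("and", a), ("or", o), ("more", m + 1), ("fewer", f), ("behind", b),
            ("in front", i), ("same", s), ("less", l)], "more") from by
        simp [pvStepA, pvWordSet, PySem.Dict.modify, PySem.Dict.insert, PySem.Dict.getD,
          PySem.Dict.get?, PySem.Set.contains, PySem.Set.ofList]]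
      rw [ih]; simp [pvPC]; omega
    by_cases h4 : w = "fewer"
    · subst h4
      rw [show pvStepA (PySem.Dict.mk [("and", a), ("or", o), ("more", m), ("fewer", f),
            ("behind", b), ("in front", i), ("same", s), ("less", l)], prev) "fewer"
          = (PySem.Dict.mk [("and", a), ("or", o), ("more", m), ("fewer", f + 1), ("behind", b),
            ("in front", i), ("same", s), ("less", l)], "fewer") from by
        simp [pvStepA, pvWordSet, PySem.Dict.modify, PySem.Dict.insert, PySem.Dict.getD,
          PySem.Dict.get?, PySem.Set.contains, PySem.Set.ofList]]
      rw [ih]; simp [pvPC]; omega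
    by_cases h5 : w = "behind"
    · subst h5
      rw [show pvStepA (PySem.Dict.mk [("and", a), ("or", o), ("more", m), ("fewer", f),
            ("behind", b), ("in front", i), ("same", s), ("less", l)], prev) "behind"
          = (PySem.Dict.mk [("and", a), ("or", o), ("more", m), ("fewer", f), ("behind", b + 1),
            ("in front", i), ("same", s), ("less", l)], "behind") from by
        simp [pvStepA, pvWordSet, PySem.Dict.modify, PySem.Dict.insert, PySem.Dict.getD,
          PySem.Dict.get?, PySem.Set.contains, PySem.Set.ofList]]
      rw [ih]; simp [pvPC]; omega
    by_cases h6 : w = "same"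
    · subst h6
      rw [show pvStepA (PySem.Dict.mk [("and", a), ("or", o), ("more", m), ("fewer", f),
            ("behind", b), ("in front", i), ("same", s), ("less", l)], prev) "same"
          = (PySem.Dict.mk [("and", a), ("or", o), ("more", m), ("fewer", f), ("behind", b),
            ("in front", i), ("same", s + 1), ("less", l)], "same") from by
        simp [pvStepA, pvWordSet, PySem.Dict.modify, PySem.Dict.insert, PySem.Dict.getD,
          PySem.Dict.get?, PySem.Set.contains, PySem.Set.ofList]]
      rw [ih]; simp [pvPC]; omega
    by_cases h7 : w = "less"
    · subst h7
      rw [show pvStepA (PySem.Dict.mk [("and", a), ("or", o), ("more", m), ("fewer", f),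
            ("behind", b), ("in front", i), ("same", s), ("less", l)], prev) "less"
          = (PySem.Dict.mk [("and", a), ("or", o), ("more", m), ("fewer", f), ("behind", b),
            ("in front", i), ("same", s), ("less", l + 1)], "less") from by
        simp [pvStepA, pvWordSet, PySem.Dict.modify, PySem.Dict.insert, PySem.Dict.getD,
          PySem.Dict.get?, PySem.Set.contains, PySem.Set.ofList]]
      rw [ih]; simp [pvPC]; omega
    by_cases h8 : w = "front"
    · subst h8
      by_cases hp : prev = "in"
      · subst hp
        rw [show pvStepA (PySem.Dict.mk [("and", a), ("or", o), ("more", m), ("fewer", f),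
              ("behind", b), ("in front", i), ("same", s), ("less", l)], "in") "front"
            = (PySem.Dict.mk [("and", a), ("or", o), ("more", m), ("fewer", f), ("behind", b),
              ("in front", i + 1), ("same", s), ("less", l)], "front") from by
          simp [pvStepA, pvWordSet, PySem.Dict.modify, PySem.Dict.insert, PySem.Dict.getD,
            PySem.Dict.get?, PySem.Set.contains, PySem.Set.ofList]]
        rw [ih]; simp [pvPC]; omega
      · rw [show pvStepA (PySem.Dict.mk [("and", a), ("or", o), ("more", m), ("fewer", f),
              ("behind", b), ("in front", i), ("same", s), ("less", l)], prev) "front"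
            = (PySem.Dict.mk [("and", a), ("or", o), ("more", m), ("fewer", f), ("behind", b),
              ("in front", i), ("same", s), ("less", l)], "front") from by
          simp [pvStepA, pvWordSet, PySem.Set.contains, PySem.Set.ofList, hp]]
        rw [ih]; simp [pvPC, hp]
    · -- w is none of the eight words: the step only updates prev
      rw [show pvStepA (PySem.Dict.mk [("and", a), ("or", o), ("more", m), ("fewer", f),
            ("behind", b), ("in front", i), ("same", s), ("less", l)], prev) w
          = (PySem.Dict.mk [("and", a), ("or", o), ("more", m), ("fewer", f), ("behind", b),
            ("in front", i), ("same", s), ("less", l)], w) from by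
        simp [pvStepA, pvWordSet, PySem.Set.contains, PySem.Set.ofList, h1, h2, h3, h4, h5, h6, h7, h8]]
      rw [ih]
      simp [pvPC, h1, h2, h3, h4, h5, h6, h7, h8]

lemma pvPC_zip (ws : List String) : ∀ (prev : String),
    pvPC prev ws = (((prev :: ws).zip ws).filter (fun p => p == ("in", "front"))).length := by
  induction ws with
  | nil => intro prev; simp [pvPC]
  | cons w ws ih =>
    intro prev
    show pvPC prev (w :: ws) = _
    rw [show (prev :: w :: ws).zip (w :: ws) = (prev, w) :: ((w :: ws).zip ws) from rfl]
    rw [List.filter_cons]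
    by_cases h : prev = "in" ∧ w = "front"
    · obtain ⟨h1, h2⟩ := h; subst h1; subst h2
      simp [pvPC, ih]
      omega
    · have hb : ((prev, w) == (("in" : String), ("front" : String))) = false := by
        rw [beq_eq_false_iff_ne]
        intro hc
        exact h ⟨congrArg Prod.fst hc, congrArg Prod.snd hc⟩
      rw [hb]
      simp only [pvPC, if_neg h, ih, Bool.false_eq_true, if_false]
      omega

-- ===== VERDICT (by name: the statement is the Claim_ definition above) =====
theorem get_token_counts_spec : Claim_equal_get_token_counts := by
  intro data _
  show get_token_counts data = get_token_counts_alt data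
  dsimp only [get_token_counts, get_token_counts_alt]
  rw [show PySem.Dict.ofList [(("and" : String), (0 : Int)), ("or", 0), ("more", 0), ("fewer", 0),
        ("behind", 0), ("in front", 0), ("same", 0), ("less", 0)]
      = PySem.Dict.mk [("and", 0), ("or", 0), ("more", 0), ("fewer", 0), ("behind", 0),
        ("in front", 0), ("same", 0), ("less", 0)] from by decide]
  rw [pvFoldA]
  rw [PySem.List.slice_from_one]
  have hpc : pvPC "" data
      = ((data.zip data.tail).filter (fun p => p == ("in", "front"))).length := by
    cases data with
    | nil => decide
    | cons t rest =>
      rw [pvPC_zip]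
      rw [show (("" :: t :: rest).zip (t :: rest)) = ("", t) :: ((t :: rest).zip rest) from rfl]
      rw [List.filter_cons]
      simp
  rw [hpc]
  simp
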